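-- pv_equiv track=rewrite | github.com/lReDragol/ESCgram | ui/message_widgets.py | _mark_quote_tokens
-- ===== SOURCE A (Python) =====
-- _QUOTE_OPEN = "\ufff0"
--
-- _QUOTE_CLOSE = "\ufff1"
--
-- def _mark_quote_tokens(text: str) -> str:
--     lines = text.replace('\r\n', '\n').replace('\r', '\n').split('\n')
--     out: list[str] = []
--     in_quote = False
--     for line in lines:
--         if line.startswith('>'):
--             if not in_quote:
--                 out.append(_QUOTE_OPEN)
--                 in_quote = True
--             out.append(line.lstrip('> '))
--         else:
--             if in_quote:
--                 out.append(_QUOTE_CLOSE)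
--                 in_quote = False
--             out.append(line)
--     if in_quote:
--         out.append(_QUOTE_CLOSE)
--     return '\n'.join(out)
-- ===== SOURCE B (Python) =====
-- _QUOTE_OPEN = "\ufff0"
-- _QUOTE_CLOSE = "\ufff1"
--
-- def _mark_quote_tokens(text: str) -> str:
--     lines = text.replace('\r\n', '\n').replace('\r', '\n').split('\n')
--     n = len(lines)
--     flags = [l.startswith('>') for l in lines]
--     # staged passes: first compute the explicit sets of block-boundary indices,
--     # then assemble the output by indexed lookup -- no scanning state at all
--     starts = {i for i in range(n) if flags[i] and (i == 0 or not flags[i - 1])}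
--     ends = {i for i in range(n) if flags[i] and (i == n - 1 or not flags[i + 1])}
--     bodies = [l.lstrip('> ') if f else l for f, l in zip(flags, lines)]
--     parts: list[str] = []
--     for i in range(n):
--         if i in starts:
--             parts.append(_QUOTE_OPEN)
--         parts.append(bodies[i])
--         if i in ends:
--             parts.append(_QUOTE_CLOSE)
--     return '\n'.join(parts)
-- ===== Notes on version B (the rewrite author's own statement) =====
-- stated objective: alternative
-- what changed: Replaces A's single-pass in_quote state machine with staged passes: B first computes explicit index sets of quote-block start and end boundaries (from each line's neighbour flags), then assembles the output by indexed lookup with no scanning state.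
import Mathlib
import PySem

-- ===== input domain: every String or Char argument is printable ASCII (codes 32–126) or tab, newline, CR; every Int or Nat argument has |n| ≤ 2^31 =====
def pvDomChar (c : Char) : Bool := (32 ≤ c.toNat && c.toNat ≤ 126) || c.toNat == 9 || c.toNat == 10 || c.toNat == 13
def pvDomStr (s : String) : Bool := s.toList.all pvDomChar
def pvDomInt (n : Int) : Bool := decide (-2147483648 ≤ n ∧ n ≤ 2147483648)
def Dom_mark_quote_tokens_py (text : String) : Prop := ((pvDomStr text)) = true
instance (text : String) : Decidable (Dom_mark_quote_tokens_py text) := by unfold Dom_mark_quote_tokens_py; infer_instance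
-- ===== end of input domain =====

-- B replaces A's in_quote scanning state machine by staged passes: it first computes
-- the explicit index sets where quote blocks start and end, then assembles the output
-- by indexed lookup (alternative decomposition; same cost).

-- ===== PORT A =====

-- exact hand port of Python's line.lstrip('> '): drop leading '>' and ' ' characters
def pvLstripGt (s : String) : String :=
  String.ofList (s.toList.dropWhile (fun c => c == '>' || c == ' '))

-- text.replace('\r\n','\n').replace('\r','\n').split('\n')
def pvLines (text : String) : List String :=
  -- split? is Python's s.split(sep); it is some whenever sep ≠ "", so getD never fires
  (PySem.Str.split? (PySem.Str.replace (PySem.Str.replace text "\r\n" "\n") "\r" "\n") "\n").getD []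

def mark_quote_tokens_py (text : String) : String :=
  let lines := pvLines text
  let st := lines.foldl (fun (acc : List String × Bool) line =>
      if PySem.Str.startswith line ">" then
        let out := if !acc.2 then acc.1 ++ ["\ufff0"] else acc.1
        (out ++ [pvLstripGt line], true)
      else
        let out := if acc.2 then acc.1 ++ ["\ufff1"] else acc.1
        (out ++ [line], false)) ([], false)
  let out := if st.2 then st.1 ++ ["\ufff1"] else st.1
  PySem.Str.join "\n" out

-- ===== PORT B =====

def mark_quote_tokens_py_alt (text : String) : String :=
  let lines := pvLines text
  let n := lines.length
  let flags := lines.map (fun l => PySem.Str.startswith l ">")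
  let starts := (List.range n).filter
    (fun i => flags.getD i false && (decide (i = 0) || !flags.getD (i - 1) false))
  let ends := (List.range n).filter
    (fun i => flags.getD i false && (decide (i = n - 1) || !flags.getD (i + 1) false))
  let bodies := (flags.zip lines).map (fun p => if p.1 then pvLstripGt p.2 else p.2)
  let parts := (List.range n).flatMap (fun i =>
    (if starts.contains i then ["\ufff0"] else []) ++ [bodies.getD i ""] ++
    (if ends.contains i then ["\ufff1"] else []))
  PySem.Str.join "\n" parts

-- ===== PRECONDITION & SPEC =====
def Spec_mark_quote_tokens_py (text : String) (out : String) : Prop := out = mark_quote_tokens_py_alt text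
instance (text : String) (out : String) : Decidable (Spec_mark_quote_tokens_py text out) := by unfold Spec_mark_quote_tokens_py; infer_instance

-- ===== CLAIM (what is proved, stated in full; the proofs are below) =====
def Claim_equal_mark_quote_tokens_py : Prop := ∀ (text : String), Dom_mark_quote_tokens_py text → Spec_mark_quote_tokens_py text (mark_quote_tokens_py text)

-- ===== LEMMAS AND PROOFS =====

def pvFlag (l : String) : Bool := PySem.Str.startswith l ">"

def pvHead : List String → Bool
  | [] => false
  | l :: _ => pvFlag l

def pvBody (l : String) : String := if pvFlag l then pvLstripGt l else l

-- A's loop re-expressed recursively: the lines still to be emitted, given the flag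
def loopA : List String → Bool → List String
  | [], inq => if inq then ["\ufff1"] else []
  | l :: ls, inq =>
    if pvFlag l then
      (if inq then [pvLstripGt l] else ["\ufff0", pvLstripGt l]) ++ loopA ls true
    else
      (if inq then ["\ufff1", l] else [l]) ++ loopA ls false

-- the per-line contribution, markers attached to each line by its neighbour flags
def pvStep (prev cur next : Bool) (b : String) : List String :=
  (if cur && !prev then ["\ufff0"] else []) ++ [b] ++ (if cur && !next then ["\ufff1"] else [])

-- middle form: recursion emitting pvStep at each line
def gsp : Bool → List String → List String
  | _, [] => []
  | p, l :: ls => pvStep p (pvFlag l) (pvHead ls) (pvBody l) ++ gsp (pvFlag l) ls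

theorem foldA_eq_loopA (lines : List String) : ∀ (out : List String) (inq : Bool),
    (if (lines.foldl (fun (acc : List String × Bool) line =>
      if PySem.Str.startswith line ">" then
        ((if !acc.2 then acc.1 ++ ["\ufff0"] else acc.1) ++ [pvLstripGt line], true)
      else
        ((if acc.2 then acc.1 ++ ["\ufff1"] else acc.1) ++ [line], false)) (out, inq)).2
     then (lines.foldl (fun (acc : List String × Bool) line =>
      if PySem.Str.startswith line ">" then
        ((if !acc.2 then acc.1 ++ ["\ufff0"] else acc.1) ++ [pvLstripGt line], true)
      else
        ((if acc.2 then acc.1 ++ ["\ufff1"] else acc.1) ++ [line], false)) (out, inq)).1 ++ ["\ufff1"]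
     else (lines.foldl (fun (acc : List String × Bool) line =>
      if PySem.Str.startswith line ">" then
        ((if !acc.2 then acc.1 ++ ["\ufff0"] else acc.1) ++ [pvLstripGt line], true)
      else
        ((if acc.2 then acc.1 ++ ["\ufff1"] else acc.1) ++ [line], false)) (out, inq)).1)
    = out ++ loopA lines inq := by
  induction lines with
  | nil => intro out inq; cases inq <;> simp [loopA]
  | cons l ls ih =>
    intro out inq
    by_cases h : PySem.Str.startswith l ">" = true
    · cases inq <;>
        simp only [List.foldl_cons, h, if_true, Bool.not_true,
          Bool.false_eq_true, if_false, loopA, pvFlag, ih] <;>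
        simp [List.append_assoc]
    · have hf : PySem.Str.startswith l ">" = false := by simpa using h
      cases inq <;>
        simp only [List.foldl_cons, hf, if_true, Bool.not_false,
          Bool.false_eq_true, if_false, loopA, pvFlag, ih] <;>
        simp [List.append_assoc]

-- A's loop equals the neighbour-attached form, up to a pending close marker
theorem loopA_eq_gsp (lines : List String) : ∀ (p : Bool),
    loopA lines p = (if p && !pvHead lines then ["\ufff1"] else []) ++ gsp p lines := by
  induction lines with
  | nil => intro p; cases p <;> simp [loopA, gsp, pvHead]
  | cons l ls ih =>
    intro p
    by_cases h : pvFlag l = true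
    · cases p <;> simp [loopA, gsp, pvStep, pvHead, h, pvBody, ih]
    · have hf : pvFlag l = false := by simpa using h
      cases p <;> simp [loopA, gsp, pvStep, pvHead, hf, pvBody, ih]

-- the parametrized index form of B's assembly
theorem gsp_eq_range (lines : List String) : ∀ (p : Bool),
    gsp p lines = (List.range lines.length).flatMap (fun i =>
      pvStep (match i with
              | 0 => p
              | j + 1 => (lines.map pvFlag).getD j false)
             ((lines.map pvFlag).getD i false)
             ((lines.map pvFlag).getD (i + 1) false)
             ((lines.map pvBody).getD i "")) := by
  induction lines with
  | nil => intro p; simp [gsp]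
  | cons l ls ih =>
    intro p
    rw [gsp, List.length_cons, List.range_succ_eq_map, List.flatMap_cons, List.flatMap_map, ih (pvFlag l)]
    congr 1
    · cases ls <;> simp [pvHead]
    · refine congrArg (List.flatMap · (List.range ls.length)) ?_
      funext i
      cases i <;> simp
-- B's staged assembly: contains over the filtered boundary lists, for indices in range
theorem contains_filter_range (n : Nat) (p : Nat → Bool) (i : Nat) (h : i < n) :
    ((List.range n).filter p).contains i = p i := by
  by_cases hp : p i = true <;> simp [List.mem_filter, List.mem_range, h, hp]

theorem bodies_eq (lines : List String) :
    ((lines.map pvFlag).zip lines).map (fun p => if p.1 then pvLstripGt p.2 else p.2)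
      = lines.map pvBody := by
  induction lines with
  | nil => rfl
  | cons l ls ih => simp [pvBody, ih]

-- the port's assembly over explicit boundary index lists equals gsp false
theorem parts_eq_gsp (lines : List String) :
    (List.range lines.length).flatMap (fun i =>
      (if (((List.range lines.length).filter (fun i =>
              (lines.map pvFlag).getD i false &&
                (decide (i = 0) || !(lines.map pvFlag).getD (i - 1) false))).contains i)
        then ["\ufff0"] else []) ++
      [(((lines.map pvFlag).zip lines).map
          (fun p => if p.1 then pvLstripGt p.2 else p.2)).getD i ""] ++
      (if (((List.range lines.length).filter (fun i =>
              (lines.map pvFlag).getD i false &&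
                (decide (i = lines.length - 1) || !(lines.map pvFlag).getD (i + 1) false))).contains i)
        then ["\ufff1"] else []))
    = gsp false lines := by
  rw [gsp_eq_range lines false, List.flatMap, List.flatMap]
  apply congrArg List.flatten
  apply List.map_congr_left
  intro i hi
  have hlt : i < lines.length := List.mem_range.mp hi
  rw [contains_filter_range _ _ _ hlt, contains_filter_range _ _ _ hlt, bodies_eq]
  congr 1
  · -- start marker: (i = 0 ∨ ¬flags[i-1]) matches "prev is false"
    cases i with
    | zero => simp
    | succ j => simp
  congr 1
  · -- end marker: (i = n-1 ∨ ¬flags[i+1]) matches "next is false"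
    by_cases he : i = lines.length - 1
    · subst he
      have hnone : lines[lines.length - 1 + 1]? = none :=
        List.getElem?_eq_none (by omega)
      simp [hnone]
    · simp [he]

theorem loopA_eq_parts (lines : List String) :
    loopA lines false =
      (List.range lines.length).flatMap (fun i =>
        (if (((List.range lines.length).filter (fun i =>
                (lines.map pvFlag).getD i false &&
                  (decide (i = 0) || !(lines.map pvFlag).getD (i - 1) false))).contains i)
          then ["\ufff0"] else []) ++
        [(((lines.map pvFlag).zip lines).map
            (fun p => if p.1 then pvLstripGt p.2 else p.2)).getD i ""] ++
        (if (((List.range lines.length).filter (fun i =>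
                (lines.map pvFlag).getD i false &&
                  (decide (i = lines.length - 1) || !(lines.map pvFlag).getD (i + 1) false))).contains i)
          then ["\ufff1"] else [])) := by
  rw [parts_eq_gsp, loopA_eq_gsp]
  simp

-- ===== VERDICT (by name: the statement is the Claim_ definition above) =====
theorem mark_quote_tokens_py_spec : Claim_equal_mark_quote_tokens_py := by
  intro text _
  show mark_quote_tokens_py text = mark_quote_tokens_py_alt text
  exact congrArg (PySem.Str.join "\n")
    ((foldA_eq_loopA (pvLines text) [] false).trans
      (by rw [List.nil_append]; exact loopA_eq_parts (pvLines text)))
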